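-- pv_equiv track=rewrite | github.com/bgmbgm892-cyber/podcast_ai | src/tts.py | script_to_segments
-- ===== SOURCE A (Python) =====
-- def script_to_segments(script_text):
--     """Split the script into short segments to synthesize.
--
--     This naive splitter groups text by blank lines and by speaker markers
--     (lines starting with 'Host:' or 'Guest:').
--     Returns a list of strings.
--     """
--     lines = [ln.strip() for ln in script_text.splitlines()]
--     segments = []
--     cur = []
--     for ln in lines:
--         if not ln:
--             if cur:
--                 segments.append(' '.join(cur))
--                 cur = []
--             continue
--         # treat speaker-labeled lines as boundaries
--         if ln.startswith('Host:') or ln.startswith('Guest:'):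
--             if cur:
--                 segments.append(' '.join(cur))
--             segments.append(ln)
--             cur = []
--             continue
--         cur.append(ln)
--     if cur:
--         segments.append(' '.join(cur))
--     return segments
-- ===== SOURCE B (Python) =====
-- def script_to_segments(script_text):
--     """Split the script into segments: two-pointer run scanner (no accumulator/flush state)."""
--     lines = [ln.strip() for ln in script_text.splitlines()]
--
--     def is_content(ln):
--         return bool(ln) and not (ln.startswith('Host:') or ln.startswith('Guest:'))
--
--     segments = []
--     i, n = 0, len(lines)
--     while i < n:
--         ln = lines[i]
--         if not ln:
--             i += 1
--         elif not is_content(ln):  # speaker marker: one segment by itself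
--             segments.append(ln)
--             i += 1
--         else:  # content: scan the whole run and join it in one step
--             j = i + 1
--             while j < n and is_content(lines[j]):
--                 j += 1
--             segments.append(' '.join(lines[i:j]))
--             i = j
--     return segments
-- ===== Notes on version B (the rewrite author's own statement) =====
-- stated objective: alternative
-- what changed: Replaces A's accumulator-and-flush loop (cur buffer flushed at blanks/speakers/end) with a two-pointer run scanner that finds each maximal content run and joins it in one step, so no pending-buffer state exists.
import Mathlib
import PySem

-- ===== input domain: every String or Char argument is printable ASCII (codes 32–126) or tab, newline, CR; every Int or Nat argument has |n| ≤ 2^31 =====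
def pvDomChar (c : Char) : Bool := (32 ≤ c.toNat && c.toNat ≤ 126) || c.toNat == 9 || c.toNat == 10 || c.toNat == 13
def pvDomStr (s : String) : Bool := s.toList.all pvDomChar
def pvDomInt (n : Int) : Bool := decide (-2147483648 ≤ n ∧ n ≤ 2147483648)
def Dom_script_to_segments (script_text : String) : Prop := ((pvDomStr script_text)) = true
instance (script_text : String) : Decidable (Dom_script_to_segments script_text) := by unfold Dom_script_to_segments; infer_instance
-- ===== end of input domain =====

-- B replaces A's accumulator-and-flush loop with a two-pointer run scanner that joins each
-- maximal content run in one step (objective: alternative decomposition, same O(n) cost).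

-- ===== PORT A =====
-- ln.startswith('Host:') or ln.startswith('Guest:')
def pvIsSpeaker (ln : String) : Bool :=
  PySem.Str.startswith ln "Host:" || PySem.Str.startswith ln "Guest:"

-- A's for-loop over lines, carrying (segments, cur); the trailing 'if cur' flush is the base case
def pvGoA : List String → List String → List String → List String
  | [], segments, cur =>
      if cur.isEmpty then segments else segments ++ [PySem.Str.join " " cur]
  | ln :: rest, segments, cur =>
      if ln = "" then
        pvGoA rest (if cur.isEmpty then segments else segments ++ [PySem.Str.join " " cur]) []
      else if pvIsSpeaker ln then
        pvGoA rest ((if cur.isEmpty then segments else segments ++ [PySem.Str.join " " cur]) ++ [ln]) []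
      else
        pvGoA rest segments (cur ++ [ln])

def script_to_segments (script_text : String) : List String :=
  pvGoA ((PySem.Str.splitlines script_text).map PySem.Str.strip) [] []

-- ===== PORT B =====
def pvIsContent (ln : String) : Bool := !(ln == "") && !pvIsSpeaker ln

-- B's outer while loop: blank lines skipped, speaker lines emitted alone,
-- a content run scanned whole (inner while = takeWhile/dropWhile) and joined in one step
def pvGoB : List String → List String
  | [] => []
  | ln :: rest =>
      if ln = "" then pvGoB rest
      else if !pvIsContent ln then ln :: pvGoB rest
      else
        PySem.Str.join " " (ln :: rest.takeWhile pvIsContent)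
          :: pvGoB (rest.dropWhile pvIsContent)
termination_by lines => lines.length
decreasing_by
  all_goals simp only [List.length_cons]
  · omega
  · omega
  · exact Nat.lt_succ_of_le (List.length_dropWhile_le _ _)

def script_to_segments_alt (script_text : String) : List String :=
  pvGoB ((PySem.Str.splitlines script_text).map PySem.Str.strip)

-- ===== PRECONDITION & SPEC =====
def Spec_script_to_segments (script_text : String) (out : List String) : Prop := out = script_to_segments_alt script_text
instance (script_text : String) (out : List String) : Decidable (Spec_script_to_segments script_text out) := by unfold Spec_script_to_segments; infer_instance

-- ===== CLAIM (what is proved, stated in full; the proofs are below) =====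
def Claim_equal_script_to_segments : Prop := ∀ (script_text : String), Dom_script_to_segments script_text → Spec_script_to_segments script_text (script_to_segments script_text)

-- ===== LEMMAS AND PROOFS =====

-- the segment contributed by a pending buffer `cur` followed by the leading content run of `lines`
def pvRunSeg (cur lines : List String) : List String :=
  if (cur ++ lines.takeWhile pvIsContent).isEmpty then []
  else [PySem.Str.join " " (cur ++ lines.takeWhile pvIsContent)]

theorem pvGoB_run (lines : List String) :
    pvRunSeg [] lines ++ pvGoB (lines.dropWhile pvIsContent) = pvGoB lines := by
  cases lines with
  | nil => simp [pvRunSeg, pvGoB]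
  | cons ln rest =>
    by_cases hc : pvIsContent ln = true
    · have hne : ln ≠ "" := by
        simp [pvIsContent] at hc; exact fun h => by simp [h] at hc
      rw [pvGoB]
      simp [pvRunSeg, List.dropWhile_cons, hc, hne]
    · simp [pvRunSeg, List.dropWhile_cons, hc]

theorem pvGoA_eq (lines : List String) : ∀ (segs cur : List String),
    pvGoA lines segs cur = segs ++ pvRunSeg cur lines ++ pvGoB (lines.dropWhile pvIsContent) := by
  induction lines with
  | nil =>
    intro segs cur
    cases cur <;> simp [pvGoA, pvRunSeg, pvGoB]
  | cons ln rest ih =>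
    intro segs cur
    by_cases hc : pvIsContent ln = true
    · have hne : ln ≠ "" := by
        simp [pvIsContent] at hc; exact fun h => by simp [h] at hc
      have hsp : pvIsSpeaker ln = false := by
        simp [pvIsContent] at hc; exact hc.2
      rw [pvGoA]
      simp only [hne, if_false, hsp, Bool.false_eq_true, if_false]
      rw [ih]
      simp [pvRunSeg, List.dropWhile_cons, hc, List.append_assoc]
    · have hdw : (ln :: rest).dropWhile pvIsContent = ln :: rest := by
        simp [List.dropWhile_cons, hc]
      have htw : (ln :: rest).takeWhile pvIsContent = [] := by
        simp [hc]
      by_cases hne : ln = ""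
      · subst hne
        rw [pvGoA]; simp only [if_true]
        rw [ih, List.append_assoc, pvGoB_run rest]
        have hB : pvGoB ("" :: rest) = pvGoB rest := by rw [pvGoB]; simp
        rw [hdw, hB]
        cases cur <;> simp [pvRunSeg, htw]
      · have hsp : pvIsSpeaker ln = true := by
          simp [pvIsContent, hne] at hc; exact hc
        rw [pvGoA]
        simp only [hne, if_false, hsp, if_true]
        rw [ih, List.append_assoc, List.append_assoc, pvGoB_run rest]
        have hB : pvGoB (ln :: rest) = ln :: pvGoB rest := by
          rw [pvGoB]; simp [hne, pvIsContent, hsp]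
        rw [hdw, hB]
        cases cur <;> simp [pvRunSeg, htw]

-- ===== VERDICT (by name: the statement is the Claim_ definition above) =====
theorem script_to_segments_spec : Claim_equal_script_to_segments := by
  intro s _
  unfold Spec_script_to_segments script_to_segments script_to_segments_alt
  rw [pvGoA_eq]
  simpa using pvGoB_run _
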